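-- pv_equiv track=rewrite | github.com/key-moon/golf | tools/search_mapping_v2.py | _gen_pos_literals_len
-- ===== SOURCE A (Python) =====
-- MAX_LITERAL_BYTES = 3  # do not generate integer literals of length >= 5
--
-- _DIGITS = "0123456789"
--
-- def _gen_pos_literals_len(L):
--     if L <= 0 or L > MAX_LITERAL_BYTES:
--         return
--     if L == 1:
--         for d in _DIGITS:
--             yield d
--         return
--     for i in range(10**(L-1), 10**L):
--         yield str(i)
-- ===== SOURCE B (Python) =====
-- MAX_LITERAL_BYTES = 3
--
-- _DIGITS = "0123456789"
--
-- def _gen_pos_literals_len(L):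
--     if L <= 0 or L > MAX_LITERAL_BYTES:
--         return
--     if L == 1:
--         yield from _DIGITS
--         return
--
--     def suffixes(k):
--         if k == 0:
--             yield ""
--             return
--         for d in _DIGITS:
--             for rest in suffixes(k - 1):
--                 yield d + rest
--
--     for first in "123456789":
--         for s in suffixes(L - 1):
--             yield first + s
-- ===== Notes on version B (the rewrite author's own statement) =====
-- stated objective: alternative
-- what changed: B builds each literal by composing digit characters (a nonzero leading digit times recursively generated digit suffixes) instead of converting every integer of the L-digit range with str(); fixed-length lexicographic order with a nonzero leading digit equals numeric order.
import Mathlib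
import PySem

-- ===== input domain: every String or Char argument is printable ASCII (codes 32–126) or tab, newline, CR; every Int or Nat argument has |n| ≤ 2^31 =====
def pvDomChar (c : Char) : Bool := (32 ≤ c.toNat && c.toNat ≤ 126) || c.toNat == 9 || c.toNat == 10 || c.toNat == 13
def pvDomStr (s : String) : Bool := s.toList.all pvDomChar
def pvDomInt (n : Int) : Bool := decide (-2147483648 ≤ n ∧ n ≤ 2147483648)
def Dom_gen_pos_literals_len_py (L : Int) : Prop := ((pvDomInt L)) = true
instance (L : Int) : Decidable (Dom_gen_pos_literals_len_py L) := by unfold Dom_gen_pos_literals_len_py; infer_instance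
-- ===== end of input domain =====

-- B composes digit characters (leading digit times recursive digit suffixes) instead of
-- converting each integer of range(10**(L-1), 10**L) with str(); alternative decomposition.


-- ===== PORT A =====
-- A: empty for L ≤ 0 or L > 3; single digits for L = 1; else str(i) over range(10^(L-1), 10^L)
def gen_pos_literals_len_py (L : Int) : List String :=
  if L ≤ 0 ∨ L > 3 then []
  else if L = 1 then "0123456789".toList.map (fun d => String.ofList [d])
  else (PySem.List.pyRange ((10 : Int) ^ (L - 1).toNat) ((10 : Int) ^ L.toNat) 1).map PySem.Int.toStr

-- ===== PORT B =====
-- suffixes k: all length-k digit strings, as character lists, in lexicographic order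
def pvAltSuffixes : Nat → List (List Char)
  | 0 => [[]]
  | k + 1 => "0123456789".toList.flatMap (fun d => (pvAltSuffixes k).map (fun rest => d :: rest))

def gen_pos_literals_len_py_alt (L : Int) : List String :=
  if L ≤ 0 ∨ L > 3 then []
  else if L = 1 then "0123456789".toList.map (fun d => String.ofList [d])
  else "123456789".toList.flatMap
        (fun first => (pvAltSuffixes (L - 1).toNat).map (fun s => String.ofList (first :: s)))

-- ===== PRECONDITION & SPEC =====
def Spec_gen_pos_literals_len_py (L : Int) (out : List String) : Prop := out = gen_pos_literals_len_py_alt L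
instance (L : Int) (out : List String) : Decidable (Spec_gen_pos_literals_len_py L out) := by unfold Spec_gen_pos_literals_len_py; infer_instance

-- ===== CLAIM (what is proved, stated in full; the proofs are below) =====
def Claim_equal_gen_pos_literals_len_py : Prop := ∀ (L : Int), Dom_gen_pos_literals_len_py L → Spec_gen_pos_literals_len_py L (gen_pos_literals_len_py L)

-- ===== LEMMAS AND PROOFS =====
theorem pv_eq_two : gen_pos_literals_len_py 2 = gen_pos_literals_len_py_alt 2 := by decide

set_option maxRecDepth 4000 in
theorem pv_eq_three : gen_pos_literals_len_py 3 = gen_pos_literals_len_py_alt 3 := by decide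

-- ===== VERDICT (by name: the statement is the Claim_ definition above) =====
theorem gen_pos_literals_len_py_spec : Claim_equal_gen_pos_literals_len_py := by
  intro L _
  unfold Spec_gen_pos_literals_len_py
  by_cases h : L ≤ 0 ∨ L > 3
  · simp [gen_pos_literals_len_py, gen_pos_literals_len_py_alt, h]
  · have : L = 1 ∨ L = 2 ∨ L = 3 := by omega
    rcases this with h1 | h2 | h3
    · subst h1; decide
    · subst h2; exact pv_eq_two
    · subst h3; exact pv_eq_three
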